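-- pv_equiv track=rewrite | github.com/Lydiacmd/Light_Up_Solver_-CNF_SAT- | graphe_lightup.py | interpreter_solution
-- ===== SOURCE A (Python) =====
-- def interpreter_solution(solution, grille, var_map):
--     """Interprète la solution du solveur SAT et renvoie une nouvelle grille avec la solution"""
--     if solution is None:
--         return None
--
--     # Créer une carte inverse: variable -> coordonnées
--     coord_map = {v: k for k, v in var_map.items()}
--
--     H = len(grille)
--     L = len(grille[0])
--
--     # Créer une nouvelle grille pour la solution
--     solution_grille = []
--     for i in range(H):
--         ligne = []
--         for j in range(L):
--             if grille[i][j] == '.':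
--                 ligne.append('.')  # Case blanche vide
--             else:
--                 ligne.append(grille[i][j])  # Mur ou mur chiffré
--         solution_grille.append(ligne)
--
--     # Placer les ampoules selon la solution
--     for var in solution:
--         if var > 0:  # Variable positive = ampoule
--             if var in coord_map:
--                 i, j = coord_map[var]
--                 solution_grille[i][j] = 'A'  # 'A' pour ampoule
--
--     return solution_grille
-- ===== SOURCE B (Python) =====
-- def interpreter_solution(solution, grille, var_map):
--     """Interprete la solution SAT: recopie la grille puis parcourt var_map en
--     marquant 'A' les cases dont la variable est positive dans la solution."""
--     if solution is None:
--         return None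
--     pos = {v for v in solution if v > 0}
--     solution_grille = [list(row) for row in grille]
--     for (i, j), var in var_map.items():
--         if var in pos:
--             solution_grille[i][j] = 'A'
--     return solution_grille
-- ===== Notes on version B (the rewrite author's own statement) =====
-- stated objective: simpler
-- what changed: B drops A's inverse coord_map and the per-cell '.' rebuild loop: it builds a set of positive variables once, copies the grid with a plain row copy, and places bulbs in a single pass over var_map items instead of looping over the solution and looking each variable up in the inverted dict.
-- outside the precondition, e.g. on interpreter_solution([1], [['.', '.']], {(0, 0): 1, (0, 1): 1}): A returns [['.', 'A']], B returns [['A', 'A']]; on interpreter_solution([1], [['.'], ['.', '#']], {(1, 0): 1}): A returns [['.'], ['A']], B returns [['.'], ['A', '#']]; on interpreter_solution([1], [['.'], ['.']], {(-1, 0): 1}): A returns [['.'], ['A']], B returns [['.'], ['A']]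
import Mathlib
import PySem

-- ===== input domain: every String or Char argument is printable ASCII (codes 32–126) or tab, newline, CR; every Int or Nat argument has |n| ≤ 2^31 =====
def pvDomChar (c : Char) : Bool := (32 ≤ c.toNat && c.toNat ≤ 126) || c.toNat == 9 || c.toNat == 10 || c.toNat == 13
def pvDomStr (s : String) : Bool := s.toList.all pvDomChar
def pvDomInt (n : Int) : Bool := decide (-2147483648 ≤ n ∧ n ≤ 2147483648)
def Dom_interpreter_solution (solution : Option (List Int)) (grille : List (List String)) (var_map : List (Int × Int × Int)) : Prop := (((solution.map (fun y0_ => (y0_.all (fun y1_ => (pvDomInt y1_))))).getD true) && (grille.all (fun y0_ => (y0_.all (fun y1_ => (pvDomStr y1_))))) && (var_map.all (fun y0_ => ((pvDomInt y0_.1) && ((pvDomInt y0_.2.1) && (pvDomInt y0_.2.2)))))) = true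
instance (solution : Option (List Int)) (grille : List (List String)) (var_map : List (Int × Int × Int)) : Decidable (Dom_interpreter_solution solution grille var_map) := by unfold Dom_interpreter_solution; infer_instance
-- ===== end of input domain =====

-- B replaces A's inverse coord_map and per-cell '.' rebuild by a positive-variable set,
-- a plain row copy, and one pass over var_map (objective: simpler; same return value on Pre_).

-- ===== PORT A =====
-- solution_grille[i][j] = 'A' : Python list assignment; pvSetCell is exact (negative index
-- from the end) for in-range indices, and Pre_ excludes out-of-range writes (IndexError).
def pvSetCell (g : List (List String)) (i j : Int) (v : String) : List (List String) :=
  PySem.List.pySetD g i (PySem.List.pySetD (PySem.List.pyGetD g i []) j v)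

def interpreter_solution (solution : Option (List Int)) (grille : List (List String)) (var_map : List (Int × Int × Int)) : Option (List (List String)) :=
  match solution with
  | none => none
  | some sol =>
    -- coord_map = {v: k for k, v in var_map.items()}
    let coord_map : PySem.Dict Int (Int × Int) :=
      var_map.foldl (fun d e => d.insert e.2.2 (e.1, e.2.1)) PySem.Dict.empty
    let H : Int := grille.length
    -- L = len(grille[0]); grille[0] raises IndexError on an empty grid, excluded by Pre_
    let L : Int := ((PySem.List.pyGetD grille 0 []).length : Int)
    -- build solution_grille by the two append loops (grille[i][j] in range under Pre_)
    let solution_grille : List (List String) :=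
      (PySem.List.pyRange 0 H 1).foldl (fun acc i =>
        acc ++ [(PySem.List.pyRange 0 L 1).foldl (fun ligne j =>
          let c := PySem.List.pyGetD (PySem.List.pyGetD grille i []) j ""
          ligne ++ [if c == "." then "." else c]) []]) []
    -- for var in solution: if var > 0 and var in coord_map: place the bulb
    some (sol.foldl (fun g var =>
      if 0 < var then
        match coord_map.get? var with
        | some p => pvSetCell g p.1 p.2 "A"
        | none => g
      else g) solution_grille)

-- ===== PORT B =====
def interpreter_solution_alt (solution : Option (List Int)) (grille : List (List String)) (var_map : List (Int × Int × Int)) : Option (List (List String)) :=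
  match solution with
  | none => none
  | some sol =>
    -- pos = {v for v in solution if v > 0}
    let pos : PySem.Set Int := PySem.Set.ofList (sol.filter (fun v => 0 < v))
    -- solution_grille = [list(row) for row in grille]
    -- for (i, j), var in var_map.items(): if var in pos: solution_grille[i][j] = 'A'
    some (var_map.foldl (fun g e =>
      if PySem.Set.contains pos e.2.2 then pvSetCell g e.1 e.2.1 "A" else g)
      (grille.map (fun row => row)))

-- ===== PRECONDITION & SPEC =====
-- For a non-None solution, Pre_ excludes: the empty grid (A raises IndexError on grille[0]);
-- ragged grids (A raises on rows shorter than grille[0] and silently truncates longer rows);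
-- bulb placements (entries of var_map whose variable is positive and in the solution) at
-- negative coordinates (Python's wraparound write is an accidental behaviour) or out-of-range
-- coordinates (IndexError); and duplicate variable numbers among those placed entries, on
-- which A's inverted-dict result keeps only the last coordinate by accident.
def Pre_interpreter_solution (solution : Option (List Int)) (grille : List (List String)) (var_map : List (Int × Int × Int)) : Prop :=
  solution = none ∨
    (grille ≠ [] ∧
     (∀ row ∈ grille, row.length = (grille.headD []).length) ∧
     (∀ e ∈ var_map, (0 < e.2.2 ∧ e.2.2 ∈ solution.getD []) →
        0 ≤ e.1 ∧ e.1 < (grille.length : Int) ∧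
        0 ≤ e.2.1 ∧ e.2.1 < ((grille.headD []).length : Int)) ∧
     ((var_map.filter (fun e => decide (0 < e.2.2) && decide (e.2.2 ∈ solution.getD []))).map (fun e => e.2.2)).Nodup)
instance (solution : Option (List Int)) (grille : List (List String)) (var_map : List (Int × Int × Int)) : Decidable (Pre_interpreter_solution solution grille var_map) := by unfold Pre_interpreter_solution; infer_instance

def pvWitness_interpreter_solution : Option (List Int) × List (List String) × (List (Int × Int × Int)) :=
  (some [1, -2], [[".", "."], [".", "#"]], [(0, 1, 1), (1, 0, 2)])

def Spec_interpreter_solution (solution : Option (List Int)) (grille : List (List String)) (var_map : List (Int × Int × Int)) (out : Option (List (List String))) : Prop := out = interpreter_solution_alt solution grille var_map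
instance (solution : Option (List Int)) (grille : List (List String)) (var_map : List (Int × Int × Int)) (out : Option (List (List String))) : Decidable (Spec_interpreter_solution solution grille var_map out) := by unfold Spec_interpreter_solution; infer_instance

-- ===== CLAIM (what is proved, stated in full; the proofs are below) =====
def Claim_equal_interpreter_solution : Prop := ∀ (solution : Option (List Int)) (grille : List (List String)) (var_map : List (Int × Int × Int)), Dom_interpreter_solution solution grille var_map → Pre_interpreter_solution solution grille var_map → Spec_interpreter_solution solution grille var_map (interpreter_solution solution grille var_map)
-- ===== LEMMAS AND PROOFS =====

def pvShape (g : List (List String)) (H L : Nat) : Prop :=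
  g.length = H ∧ ∀ r ∈ g, r.length = L

def pvCell (g : List (List String)) (a b : Nat) : String :=
  (g.getD a []).getD b ""

def pvWrites (ops : List (Int × Int)) (g : List (List String)) : List (List String) :=
  ops.foldl (fun g p => pvSetCell g p.1 p.2 "A") g

def pvValid (ops : List (Int × Int)) (H L : Nat) : Prop :=
  ∀ p ∈ ops, 0 ≤ p.1 ∧ p.1 < (H : Int) ∧ 0 ≤ p.2 ∧ p.2 < (L : Int)

theorem pvSetCell_shape {g : List (List String)} {H L : Nat} (hg : pvShape g H L)
    {i j : Int} (hi0 : 0 ≤ i) (hi : i < (H : Int)) :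
    pvShape (pvSetCell g i j "A") H L := by
  obtain ⟨hlen, hrow⟩ := hg
  have hilen : i < (g.length : Int) := by rw [hlen]; exact hi
  unfold pvSetCell
  rw [PySem.List.pySetD_of_nonneg _ _ hi0]
  refine ⟨by simpa using hlen, ?_⟩
  intro r hr
  rcases List.mem_or_eq_of_mem_set hr with h | h
  · exact hrow r h
  · subst h
    rw [PySem.List.length_pySetD, PySem.List.pyGetD_eq_getElem _ _ hi0 hilen]
    exact hrow _ (List.getElem_mem _)

theorem pvSetCell_cell {g : List (List String)} {H L : Nat} (hg : pvShape g H L)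
    {i j : Int} (hi0 : 0 ≤ i) (hi : i < (H : Int)) (hj0 : 0 ≤ j) (hj : j < (L : Int))
    {a b : Nat} (ha : a < H) (hb : b < L) :
    pvCell (pvSetCell g i j "A") a b = if i = (a : Int) ∧ j = (b : Int) then "A" else pvCell g a b := by
  obtain ⟨hlen, hrow⟩ := hg
  have hilen : i < (g.length : Int) := by rw [hlen]; exact hi
  have hiN : i.toNat < g.length := by omega
  unfold pvSetCell pvCell
  rw [PySem.List.pySetD_of_nonneg _ _ hi0, PySem.List.pySetD_of_nonneg _ _ hj0,
      PySem.List.pyGetD_eq_getElem _ _ hi0 hilen]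
  have hglen : g[i.toNat].length = L := hrow _ (List.getElem_mem hiN)
  have hjN : j.toNat < g[i.toNat].length := by omega
  simp only [List.getD_eq_getElem?_getD]
  by_cases hia : i.toNat = a
  · subst hia
    rw [List.getElem?_set_self hiN]
    simp only [Option.getD_some]
    by_cases hjb : j.toNat = b
    · subst hjb
      rw [List.getElem?_set_self hjN]
      have hc : i = ((i.toNat : Nat) : Int) ∧ j = ((j.toNat : Nat) : Int) := ⟨by omega, by omega⟩
      rw [if_pos hc]
      rfl
    · rw [List.getElem?_set_ne hjb]
      have hc : ¬ (i = ((i.toNat : Nat) : Int) ∧ j = (b : Int)) := by omega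
      rw [if_neg hc]
      simp [List.getElem?_eq_getElem hiN]
  · rw [List.getElem?_set_ne hia]
    have hc : ¬ (i = (a : Int) ∧ j = (b : Int)) := by
      rintro ⟨h1, -⟩; omega
    rw [if_neg hc]

theorem pvWrites_shape (ops : List (Int × Int)) {g : List (List String)} {H L : Nat}
    (hv : pvValid ops H L) (hg : pvShape g H L) : pvShape (pvWrites ops g) H L := by
  induction ops generalizing g with
  | nil => exact hg
  | cons p ops ih =>
    obtain ⟨h1, h2, h3, h4⟩ := hv p List.mem_cons_self
    exact ih (fun q hq => hv q (List.mem_cons_of_mem _ hq)) (pvSetCell_shape (j := p.2) hg h1 h2)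

theorem pvWrites_cell (ops : List (Int × Int)) {g : List (List String)} {H L : Nat}
    (hv : pvValid ops H L) (hg : pvShape g H L) {a b : Nat} (ha : a < H) (hb : b < L) :
    pvCell (pvWrites ops g) a b =
      if ∃ p ∈ ops, p.1 = (a : Int) ∧ p.2 = (b : Int) then "A" else pvCell g a b := by
  induction ops generalizing g with
  | nil => simp [pvWrites]
  | cons p ops ih =>
    obtain ⟨h1, h2, h3, h4⟩ := hv p List.mem_cons_self
    have step := ih (g := pvSetCell g p.1 p.2 "A") (fun q hq => hv q (List.mem_cons_of_mem _ hq)) (pvSetCell_shape (j := p.2) hg h1 h2)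
    have hcell := pvSetCell_cell hg h1 h2 h3 h4 (a := a) (b := b) ha hb
    show pvCell (pvWrites ops (pvSetCell g p.1 p.2 "A")) a b = _
    rw [step, hcell]
    by_cases hex : ∃ q ∈ p :: ops, q.1 = (a : Int) ∧ q.2 = (b : Int)
    · rw [if_pos hex]
      rcases hex with ⟨q, hq, hq2⟩
      rcases List.mem_cons.1 hq with rfl | hq'
      · split_ifs <;> rfl
      · rw [if_pos ⟨q, hq', hq2⟩]
    · rw [if_neg hex]
      have h1 : ¬ ∃ q ∈ ops, q.1 = (a : Int) ∧ q.2 = (b : Int) :=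
        fun ⟨q, hq, h⟩ => hex ⟨q, List.mem_cons_of_mem _ hq, h⟩
      have h2 : ¬ (p.1 = (a : Int) ∧ p.2 = (b : Int)) :=
        fun h => hex ⟨p, List.mem_cons_self, h⟩
      rw [if_neg h1, if_neg h2]

theorem pvFoldA (cm : PySem.Dict Int (Int × Int)) (sol : List Int) (g : List (List String)) :
    sol.foldl (fun g var =>
      if 0 < var then
        match cm.get? var with
        | some p => pvSetCell g p.1 p.2 "A"
        | none => g
      else g) g
    = pvWrites (sol.filterMap (fun var => if 0 < var then cm.get? var else none)) g := by
  induction sol generalizing g with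
  | nil => rfl
  | cons v sol ih =>
    simp only [List.foldl_cons, List.filterMap_cons]
    by_cases h0 : 0 < v
    · cases hcm : cm.get? v with
      | some p =>
        simp only [if_pos h0]
        rw [ih]
        rfl
      | none =>
        simp only [if_pos h0]
        exact ih g
    · simp only [if_neg h0]
      exact ih g

theorem pvFoldB (pos : PySem.Set Int) (vm : List (Int × Int × Int)) (g : List (List String)) :
    vm.foldl (fun g e =>
      if PySem.Set.contains pos e.2.2 then pvSetCell g e.1 e.2.1 "A" else g) g
    = pvWrites (vm.filterMap (fun e =>
        if PySem.Set.contains pos e.2.2 then some (e.1, e.2.1) else none)) g := by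
  induction vm generalizing g with
  | nil => rfl
  | cons e vm ih =>
    simp only [List.foldl_cons, List.filterMap_cons]
    by_cases hc : PySem.Set.contains pos e.2.2 = true
    · simp only [hc, if_true]
      rw [ih]
      rfl
    · simp only [eq_false_of_ne_true hc, Bool.false_eq_true, if_false]
      exact ih g

theorem pvCM_get_eq (vm : List (Int × Int × Int)) (v : Int) :
    (vm.foldl (fun d e => d.insert e.2.2 (e.1, e.2.1)) PySem.Dict.empty).get? v
      = (vm.reverse.find? (fun e => e.2.2 == v)).map (fun e => (e.1, e.2.1)) := by
  induction vm using List.reverseRecOn with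
  | nil => simp [PySem.Dict.get?_empty]
  | append_singleton vs e ih =>
    rw [List.foldl_append, List.foldl_cons, List.foldl_nil, PySem.Dict.get?_insert,
        List.reverse_append]
    simp only [List.reverse_cons, List.reverse_nil, List.nil_append, List.cons_append,
      List.find?_cons]
    by_cases h : e.2.2 = v
    · simp [h]
    · have hb : (e.2.2 == v) = false := by simp [h]
      rw [if_neg fun hh => h hh.symm, hb, ih]

theorem pvCM_get_mem (vm : List (Int × Int × Int)) (v : Int) (p : Int × Int)
    (h : (vm.foldl (fun d e => d.insert e.2.2 (e.1, e.2.1)) PySem.Dict.empty).get? v = some p) :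
    (p.1, p.2, v) ∈ vm := by
  rw [pvCM_get_eq] at h
  rcases Option.map_eq_some_iff.1 h with ⟨e, hfind, hep⟩
  have hpred := List.find?_some hfind
  have hmem : e ∈ vm := List.mem_reverse.1 (List.mem_of_find?_eq_some hfind)
  have hv : e.2.2 = v := by simpa using hpred
  have : (p.1, p.2, v) = e := by
    obtain ⟨e1, e2, e3⟩ := e
    simp only [Prod.ext_iff] at hep
    simp only [Prod.mk.injEq]
    exact ⟨hep.1.symm, hep.2.symm, hv.symm⟩
  rwa [this]

theorem pvCM_get_of_mem (vm : List (Int × Int × Int)) (sol : List Int)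
    (hn : ((vm.filter (fun e => decide (0 < e.2.2) && decide (e.2.2 ∈ sol))).map (fun e => e.2.2)).Nodup)
    {v : Int} {p : Int × Int} (h0 : 0 < v) (hs : v ∈ sol) (hmem : (p.1, p.2, v) ∈ vm) :
    (vm.foldl (fun d e => d.insert e.2.2 (e.1, e.2.1)) PySem.Dict.empty).get? v = some p := by
  rw [pvCM_get_eq]
  have hsome : (vm.reverse.find? (fun e => e.2.2 == v)).isSome :=
    List.find?_isSome.2 ⟨_, List.mem_reverse.2 hmem, by simp⟩
  obtain ⟨e, hfind⟩ := Option.isSome_iff_exists.1 hsome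
  have hv : e.2.2 = v := by simpa using List.find?_some hfind
  have hevm : e ∈ vm := List.mem_reverse.1 (List.mem_of_find?_eq_some hfind)
  have hf1 : e ∈ vm.filter (fun e => decide (0 < e.2.2) && decide (e.2.2 ∈ sol)) :=
    List.mem_filter.2 ⟨hevm, by simp [hv, h0, hs]⟩
  have hf2 : (p.1, p.2, v) ∈ vm.filter (fun e => decide (0 < e.2.2) && decide (e.2.2 ∈ sol)) :=
    List.mem_filter.2 ⟨hmem, by simp [h0, hs]⟩
  have heq : e = (p.1, p.2, v) :=
    List.inj_on_of_nodup_map hn hf1 hf2 (by simp [hv])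
  rw [hfind, heq]
  simp

theorem pvBase (grille : List (List String)) (hne : grille ≠ [])
    (hrect : ∀ row ∈ grille, row.length = (grille.headD []).length) :
    (PySem.List.pyRange 0 (grille.length : Int) 1).foldl (fun acc i =>
        acc ++ [(PySem.List.pyRange 0 ((PySem.List.pyGetD grille 0 []).length : Int) 1).foldl (fun ligne j =>
          let c := PySem.List.pyGetD (PySem.List.pyGetD grille i []) j ""
          ligne ++ [if c == "." then "." else c]) []]) []
    = grille := by
  have hid : ∀ c : String, (if c == "." then "." else c) = c := by
    intro c
    by_cases h : c = "."
    · simp [h]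
    · simp [h]
  have h0 : (PySem.List.pyGetD grille 0 []).length = (grille.headD []).length := by
    cases grille with
    | nil => exact absurd rfl hne
    | cons r rest => simp [PySem.List.pyGetD_zero_cons]
  rw [PySem.List.foldl_append_singleton_eq_map, List.nil_append]
  have hinner : ∀ i ∈ PySem.List.pyRange 0 (grille.length : Int) 1,
      ((PySem.List.pyRange 0 ((PySem.List.pyGetD grille 0 []).length : Int) 1).foldl (fun ligne j =>
          let c := PySem.List.pyGetD (PySem.List.pyGetD grille i []) j ""
          ligne ++ [if c == "." then "." else c]) [])
       = PySem.List.pyGetD grille i [] := by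
    intro i hi
    rw [PySem.List.mem_pyRange_one] at hi
    have hlen : (PySem.List.pyGetD grille i []).length = (PySem.List.pyGetD grille 0 []).length := by
      rw [h0, PySem.List.pyGetD_eq_getElem _ _ hi.1 hi.2]
      exact hrect _ (List.getElem_mem (by omega))
    rw [PySem.List.foldl_append_singleton_eq_map, List.nil_append]
    have : ∀ j, (let c := PySem.List.pyGetD (PySem.List.pyGetD grille i []) j ""
        ; (if c == "." then "." else c)) = PySem.List.pyGetD (PySem.List.pyGetD grille i []) j "" := by
      intro j
      exact hid _
    calc (PySem.List.pyRange 0 ((PySem.List.pyGetD grille 0 []).length : Int) 1).map _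
        = (PySem.List.pyRange 0 (((PySem.List.pyGetD grille i []).length : Nat) : Int) 1).map
            (fun j => PySem.List.pyGetD (PySem.List.pyGetD grille i []) j "") := by
          rw [hlen]
          exact List.map_congr_left (fun j _ => this j)
      _ = PySem.List.pyGetD grille i [] := PySem.List.map_pyGetD_pyRange_zero' _ _
  rw [List.map_congr_left hinner]
  exact PySem.List.map_pyGetD_pyRange_zero' _ _

def pvCM (vm : List (Int × Int × Int)) : PySem.Dict Int (Int × Int) :=
  vm.foldl (fun d e => d.insert e.2.2 (e.1, e.2.1)) PySem.Dict.empty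

def pvPos (sol : List Int) : PySem.Set Int :=
  PySem.Set.ofList (sol.filter (fun v => 0 < v))

def pvOpsA (sol : List Int) (vm : List (Int × Int × Int)) : List (Int × Int) :=
  sol.filterMap (fun var => if 0 < var then (pvCM vm).get? var else none)

def pvOpsB (sol : List Int) (vm : List (Int × Int × Int)) : List (Int × Int) :=
  vm.filterMap (fun e => if PySem.Set.contains (pvPos sol) e.2.2 then some (e.1, e.2.1) else none)

theorem pvPos_contains (sol : List Int) (v : Int) :
    PySem.Set.contains (pvPos sol) v = true ↔ v ∈ sol ∧ 0 < v := by
  rw [PySem.Set.contains_iff, pvPos, PySem.Set.mem_ofList, List.mem_filter]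
  simp

theorem pvOps_mem (sol : List Int) (vm : List (Int × Int × Int))
    (hn : ((vm.filter (fun e => decide (0 < e.2.2) && decide (e.2.2 ∈ sol))).map (fun e => e.2.2)).Nodup)
    (p : Int × Int) :
    p ∈ pvOpsA sol vm ↔ p ∈ pvOpsB sol vm := by
  simp only [pvOpsA, pvOpsB, List.mem_filterMap]
  constructor
  · rintro ⟨v, hv, hsome⟩
    by_cases h0 : 0 < v
    · rw [if_pos h0] at hsome
      have hmem := pvCM_get_mem vm v p hsome
      refine ⟨(p.1, p.2, v), hmem, ?_⟩
      rw [if_pos ((pvPos_contains sol v).2 ⟨hv, h0⟩)]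
    · rw [if_neg h0] at hsome
      cases hsome
  · rintro ⟨e, he, hsome⟩
    by_cases hc : PySem.Set.contains (pvPos sol) e.2.2 = true
    · rw [if_pos hc] at hsome
      obtain ⟨hmem, h0⟩ := (pvPos_contains sol e.2.2).1 hc
      injection hsome with hep
      refine ⟨e.2.2, hmem, ?_⟩
      rw [if_pos h0, pvCM]
      refine pvCM_get_of_mem vm sol hn h0 hmem ?_
      have : (p.1, p.2, e.2.2) = e := by
        obtain ⟨e1, e2, e3⟩ := e
        simp only [Prod.ext_iff] at hep
        simp only [Prod.mk.injEq]
        exact ⟨hep.1.symm, hep.2.symm, trivial⟩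
      rwa [this]
    · rw [if_neg hc] at hsome
      cases hsome

theorem pvOpsB_valid (sol : List Int) (vm : List (Int × Int × Int)) {H L : Nat}
    (hrange : ∀ e ∈ vm, (0 < e.2.2 ∧ e.2.2 ∈ sol) →
      0 ≤ e.1 ∧ e.1 < (H : Int) ∧ 0 ≤ e.2.1 ∧ e.2.1 < (L : Int)) :
    pvValid (pvOpsB sol vm) H L := by
  intro p hp
  rw [pvOpsB, List.mem_filterMap] at hp
  obtain ⟨e, he, hsome⟩ := hp
  by_cases hc : PySem.Set.contains (pvPos sol) e.2.2 = true
  · rw [if_pos hc] at hsome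
    obtain ⟨hmem, h0⟩ := (pvPos_contains sol e.2.2).1 hc
    injection hsome with hep
    obtain ⟨h1, h2, h3, h4⟩ := hrange e he ⟨h0, hmem⟩
    subst hep
    exact ⟨h1, h2, h3, h4⟩
  · rw [if_neg hc] at hsome
    cases hsome

theorem pvOpsA_valid (sol : List Int) (vm : List (Int × Int × Int)) {H L : Nat}
    (hrange : ∀ e ∈ vm, (0 < e.2.2 ∧ e.2.2 ∈ sol) →
      0 ≤ e.1 ∧ e.1 < (H : Int) ∧ 0 ≤ e.2.1 ∧ e.2.1 < (L : Int)) :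
    pvValid (pvOpsA sol vm) H L := by
  intro p hp
  rw [pvOpsA, List.mem_filterMap] at hp
  obtain ⟨v, hv, hsome⟩ := hp
  by_cases h0 : 0 < v
  · rw [if_pos h0, pvCM] at hsome
    exact hrange _ (pvCM_get_mem vm v p hsome) ⟨h0, hv⟩
  · rw [if_neg h0] at hsome
    cases hsome

theorem pvWrites_eq (sol : List Int) (vm : List (Int × Int × Int)) (grille : List (List String))
    (hn : ((vm.filter (fun e => decide (0 < e.2.2) && decide (e.2.2 ∈ sol))).map (fun e => e.2.2)).Nodup)
    (hrect : ∀ row ∈ grille, row.length = (grille.headD []).length)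
    (hrange : ∀ e ∈ vm, (0 < e.2.2 ∧ e.2.2 ∈ sol) →
        0 ≤ e.1 ∧ e.1 < (grille.length : Int) ∧
        0 ≤ e.2.1 ∧ e.2.1 < ((grille.headD []).length : Int)) :
    pvWrites (pvOpsA sol vm) grille = pvWrites (pvOpsB sol vm) grille := by
  have hshape : pvShape grille grille.length (grille.headD []).length := ⟨rfl, hrect⟩
  have hvA := pvOpsA_valid sol vm hrange
  have hvB := pvOpsB_valid sol vm hrange
  have hsA := pvWrites_shape (pvOpsA sol vm) hvA hshape
  have hsB := pvWrites_shape (pvOpsB sol vm) hvB hshape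
  apply List.ext_getElem (by rw [hsA.1, hsB.1])
  intro a ha ha'
  have haH : a < grille.length := by rw [hsA.1] at ha; exact ha
  apply List.ext_getElem
  · rw [hsA.2 _ (List.getElem_mem ha), hsB.2 _ (List.getElem_mem ha')]
  intro b hb hb'
  have hbL : b < (grille.headD []).length := by
    rw [hsA.2 _ (List.getElem_mem ha)] at hb
    exact hb
  have hcellA := pvWrites_cell (pvOpsA sol vm) hvA hshape haH hbL
  have hcellB := pvWrites_cell (pvOpsB sol vm) hvB hshape haH hbL
  have hifc : (∃ p ∈ pvOpsA sol vm, p.1 = (a : Int) ∧ p.2 = (b : Int)) ↔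
      (∃ p ∈ pvOpsB sol vm, p.1 = (a : Int) ∧ p.2 = (b : Int)) := by
    constructor
    · rintro ⟨q, hq, h⟩
      exact ⟨q, (pvOps_mem sol vm hn q).1 hq, h⟩
    · rintro ⟨q, hq, h⟩
      exact ⟨q, (pvOps_mem sol vm hn q).2 hq, h⟩
  have hA : pvCell (pvWrites (pvOpsA sol vm) grille) a b
      = (pvWrites (pvOpsA sol vm) grille)[a].getD b "" := by
    rw [pvCell, List.getD_eq_getElem _ _ ha]
  have hB : pvCell (pvWrites (pvOpsB sol vm) grille) a b
      = (pvWrites (pvOpsB sol vm) grille)[a].getD b "" := by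
    rw [pvCell, List.getD_eq_getElem _ _ ha']
  have hgA : (pvWrites (pvOpsA sol vm) grille)[a].getD b ""
      = (pvWrites (pvOpsA sol vm) grille)[a][b] := List.getD_eq_getElem _ _ hb
  have hgB : (pvWrites (pvOpsB sol vm) grille)[a].getD b ""
      = (pvWrites (pvOpsB sol vm) grille)[a][b] := List.getD_eq_getElem _ _ hb'
  rw [← hgA, ← hgB, ← hA, ← hB, hcellA, hcellB]
  exact if_congr hifc rfl rfl

-- ===== VERDICT (by name: the statement is the Claim_ definition above) =====
theorem interpreter_solution_spec : Claim_equal_interpreter_solution := by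
  intro solution grille var_map hdom hpre
  unfold Spec_interpreter_solution
  cases solution with
  | none => rfl
  | some sol =>
    rcases hpre with h | ⟨hne, hrect, hrange, hnodup⟩
    · cases h
    · show interpreter_solution (some sol) grille var_map = _
      unfold interpreter_solution interpreter_solution_alt
      simp only []
      rw [pvBase grille hne hrect, pvFoldA, pvFoldB, List.map_id']
      exact congrArg some (pvWrites_eq sol var_map grille hnodup hrect hrange)
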